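-- pv_equiv track=rewrite | github.com/sleepy-sun/CSUS-Comp-Sci | CSC-135/Homework/Code Step by Step/recursion/stutter_list.py | stutter_list
-- ===== SOURCE A (Python) =====
-- def stutter_list(num):
--     if len(num) == 0:
--         return num
--     else:
--         tmp = num.pop()
--         stutter_list(num)
--         num.append(tmp)
--         num.append(tmp)
--     return num
-- ===== SOURCE B (Python) =====
-- def stutter_list(num):
--     out = []
--     for x in num:
--         out.append(x)
--         out.append(x)
--     num[:] = out
--     return num
-- ===== Notes on version B (the rewrite author's own statement) =====
-- stated objective: idiomatic
-- what changed: Replaces the pop/recurse/append recursion with a single flat loop that builds the doubled list and writes it back with slice assignment.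
import Mathlib
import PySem

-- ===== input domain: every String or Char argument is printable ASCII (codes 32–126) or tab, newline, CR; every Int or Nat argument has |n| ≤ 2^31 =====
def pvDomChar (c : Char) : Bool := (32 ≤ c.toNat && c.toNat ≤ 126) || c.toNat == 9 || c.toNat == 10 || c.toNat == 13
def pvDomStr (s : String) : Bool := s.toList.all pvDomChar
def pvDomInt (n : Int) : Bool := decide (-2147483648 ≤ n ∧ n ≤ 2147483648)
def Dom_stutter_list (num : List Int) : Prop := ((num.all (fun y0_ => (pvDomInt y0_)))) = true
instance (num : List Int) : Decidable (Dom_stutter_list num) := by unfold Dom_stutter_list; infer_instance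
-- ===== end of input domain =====

-- B replaces A's pop/recurse/append recursion with one flat loop building the doubled
-- list, written back in place via num[:] = out (equivalence proved about the RETURN
-- value; both A and B mutate the argument list in Python).

-- ===== PORT A =====
-- A: if empty, return num; else tmp = num.pop(); stutter_list(num); num.append(tmp) twice.
def stutter_list (num : List Int) : List Int :=
  if num.length = 0 then num
  else
    match h : PySem.List.pop? num with
    | none => num   -- unreachable: pop() on a nonempty list succeeds
    | some (tmp, rest) => (stutter_list rest ++ [tmp]) ++ [tmp]
termination_by num.length
decreasing_by
  have h2 := PySem.List.length_of_pop?_eq_some num h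
  simp at h2 ⊢
  omega

-- ===== PORT B =====
-- B: out = []; for x in num: out.append(x); out.append(x); num[:] = out; return num
def stutter_list_alt (num : List Int) : List Int :=
  num.foldl (fun out x => (out ++ [x]) ++ [x]) []

-- ===== PRECONDITION & SPEC =====
def Spec_stutter_list (num : List Int) (out : List Int) : Prop := out = stutter_list_alt num
instance (num : List Int) (out : List Int) : Decidable (Spec_stutter_list num out) := by unfold Spec_stutter_list; infer_instance

-- ===== CLAIM (what is proved, stated in full; the proofs are below) =====
def Claim_equal_stutter_list : Prop := ∀ (num : List Int), Dom_stutter_list num → Spec_stutter_list num (stutter_list num)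

-- ===== LEMMAS AND PROOFS =====

theorem stutter_list_alt_eq_flatMap (num : List Int) :
    stutter_list_alt num = num.flatMap (fun x => [x, x]) := by
  unfold stutter_list_alt
  have h : ∀ (out : List Int) (x : Int), (out ++ [x]) ++ [x] = out ++ [x, x] := by
    simp
  calc num.foldl (fun out x => (out ++ [x]) ++ [x]) []
      = num.foldl (fun out x => out ++ [x, x]) [] := by
        simp only [h]
    _ = [] ++ num.flatMap (fun x => [x, x]) := PySem.List.foldl_append_eq_flatMap _ _ _
    _ = num.flatMap (fun x => [x, x]) := by simp

theorem stutter_list_eq_flatMap (num : List Int) :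
    stutter_list num = num.flatMap (fun x => [x, x]) := by
  induction num using List.reverseRecOn with
  | nil => rw [stutter_list.eq_def]; simp
  | append_singleton xs x ih =>
      rw [stutter_list.eq_def]
      rw [if_neg (by simp)]
      split
      next heq =>
        rw [PySem.List.pop?_last] at heq
        exact absurd heq (by simp)
      next tmp rest heq =>
        rw [PySem.List.pop?_last] at heq
        obtain ⟨rfl, rfl⟩ : x = tmp ∧ xs = rest := by
          simpa using heq
        simp [ih]

-- ===== VERDICT (by name: the statement is the Claim_ definition above) =====
theorem stutter_list_spec : Claim_equal_stutter_list := by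
  intro num _
  unfold Spec_stutter_list
  rw [stutter_list_eq_flatMap, stutter_list_alt_eq_flatMap]
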